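-- pv_equiv track=rewrite | github.com/i-vadoxiaoming/chromeAddon-FX-NEWS-Hub | Fx Dashborad/rss_data/rss_parser.py | get_default_image
-- ===== SOURCE A (Python) =====
-- def get_default_image(article_type):
--     """根据文章类型返回默认图片"""
--     default_images = {
--         'forex': 'https://editorial.fxstreet.com/images/Markets/Currencies/Major/EURUSD-1_Large.jpg',
--         'stocks': 'https://editorial.fxstreet.com/images/Markets/Indices/Major/SP500_Large.jpg',
--         'commodities': 'https://editorial.fxstreet.com/images/Markets/Commodities/Energy/Oil_Large.jpg',
--         'crypto': 'https://editorial.fxstreet.com/images/Markets/Cryptocurrencies/Bitcoin_Large.jpg',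
--         'economy': 'https://editorial.fxstreet.com/images/Economic/economic-calendar_Large.jpg',
--         'default': 'https://editorial.fxstreet.com/images/Markets/Currencies/Major/EURUSD-1_Large.jpg'
--     }
--
--     # 根据标题或描述判断文章类型
--     text = (article_type.get('title', '') + ' ' + article_type.get('description', '')).lower()
--
--     if any(word in text for word in ['forex', 'eur', 'usd', 'gbp', 'jpy', 'currency']):
--         return default_images['forex']
--     elif any(word in text for word in ['stocks', 'dow', 'nasdaq', 's&p', 'index']):
--         return default_images['stocks']
--     elif any(word in text for word in ['gold', 'oil', 'commodity', 'commodities']):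
--         return default_images['commodities']
--     elif any(word in text for word in ['bitcoin', 'crypto', 'btc', 'eth']):
--         return default_images['crypto']
--     elif any(word in text for word in ['gdp', 'economy', 'inflation', 'fed', 'rate']):
--         return default_images['economy']
--
--     return default_images['default']
-- ===== SOURCE B (Python) =====
-- _DEFAULT = 'https://editorial.fxstreet.com/images/Markets/Currencies/Major/EURUSD-1_Large.jpg'
--
-- # URL of category number r (0=forex, 1=stocks, 2=commodities, 3=crypto, 4=economy)
-- _CATEGORY_URLS = [
--     'https://editorial.fxstreet.com/images/Markets/Currencies/Major/EURUSD-1_Large.jpg',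
--     'https://editorial.fxstreet.com/images/Markets/Indices/Major/SP500_Large.jpg',
--     'https://editorial.fxstreet.com/images/Markets/Commodities/Energy/Oil_Large.jpg',
--     'https://editorial.fxstreet.com/images/Markets/Cryptocurrencies/Bitcoin_Large.jpg',
--     'https://editorial.fxstreet.com/images/Economic/economic-calendar_Large.jpg',
-- ]
--
-- # flat keyword -> category rank map (rank = priority of the category)
-- _KEYWORD_RANK = {
--     'forex': 0, 'eur': 0, 'usd': 0, 'gbp': 0, 'jpy': 0, 'currency': 0,
--     'stocks': 1, 'dow': 1, 'nasdaq': 1, 's&p': 1, 'index': 1,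
--     'gold': 2, 'oil': 2, 'commodity': 2, 'commodities': 2,
--     'bitcoin': 3, 'crypto': 3, 'btc': 3, 'eth': 3,
--     'gdp': 4, 'economy': 4, 'inflation': 4, 'fed': 4, 'rate': 4,
-- }
--
--
-- def get_default_image(article_type):
--     """根据文章类型返回默认图片 (min-rank reduction over a flat keyword map)"""
--     text = (article_type.get('title', '') + ' ' + article_type.get('description', '')).lower()
--     ranks = [r for kw, r in _KEYWORD_RANK.items() if kw in text]
--     if not ranks:
--         return _DEFAULT
--     return _CATEGORY_URLS[min(ranks)]
-- ===== Notes on version B (the rewrite author's own statement) =====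
-- stated objective: alternative
-- what changed: Replaces the ordered five-branch elif cascade by a rank reduction: a flat keyword->category-rank dict, a comprehension collecting the ranks of all keywords occurring in the text, and min(ranks) indexing a url table (default if no keyword matches); the branch order is encoded as numeric ranks rather than control flow.
import Mathlib
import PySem

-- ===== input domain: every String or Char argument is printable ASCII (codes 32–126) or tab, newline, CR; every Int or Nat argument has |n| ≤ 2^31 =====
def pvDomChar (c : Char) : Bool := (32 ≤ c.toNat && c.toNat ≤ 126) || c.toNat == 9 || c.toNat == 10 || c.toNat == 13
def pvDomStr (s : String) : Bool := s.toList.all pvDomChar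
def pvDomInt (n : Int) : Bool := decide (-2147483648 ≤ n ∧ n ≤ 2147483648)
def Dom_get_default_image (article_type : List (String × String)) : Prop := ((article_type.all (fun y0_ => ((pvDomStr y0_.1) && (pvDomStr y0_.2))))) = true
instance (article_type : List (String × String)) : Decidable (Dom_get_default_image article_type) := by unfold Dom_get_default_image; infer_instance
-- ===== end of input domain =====

-- B replaces A's elif cascade by a min-rank reduction over a flat keyword->rank map; objective: alternative.


-- ===== PORT A =====
-- literal transliteration of A; the d['k'] lookups hit keys statically present in
-- the literal dict, so get? is always `some` and `.getD ""` never supplies the default.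
def get_default_image (article_type : List (String × String)) : String :=
  let default_images : PySem.Dict String String := PySem.Dict.ofList
    [("forex", "https://editorial.fxstreet.com/images/Markets/Currencies/Major/EURUSD-1_Large.jpg"),
     ("stocks", "https://editorial.fxstreet.com/images/Markets/Indices/Major/SP500_Large.jpg"),
     ("commodities", "https://editorial.fxstreet.com/images/Markets/Commodities/Energy/Oil_Large.jpg"),
     ("crypto", "https://editorial.fxstreet.com/images/Markets/Cryptocurrencies/Bitcoin_Large.jpg"),
     ("economy", "https://editorial.fxstreet.com/images/Economic/economic-calendar_Large.jpg"),
     ("default", "https://editorial.fxstreet.com/images/Markets/Currencies/Major/EURUSD-1_Large.jpg")]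
  let text := PySem.Str.lower ((PySem.Dict.mk article_type).getD "title" "" ++ " " ++ (PySem.Dict.mk article_type).getD "description" "")
  if ["forex", "eur", "usd", "gbp", "jpy", "currency"].any (fun word => PySem.Str.isIn word text) then
    ((default_images.get? "forex").getD "")
  else if ["stocks", "dow", "nasdaq", "s&p", "index"].any (fun word => PySem.Str.isIn word text) then
    ((default_images.get? "stocks").getD "")
  else if ["gold", "oil", "commodity", "commodities"].any (fun word => PySem.Str.isIn word text) then
    ((default_images.get? "commodities").getD "")
  else if ["bitcoin", "crypto", "btc", "eth"].any (fun word => PySem.Str.isIn word text) then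
    ((default_images.get? "crypto").getD "")
  else if ["gdp", "economy", "inflation", "fed", "rate"].any (fun word => PySem.Str.isIn word text) then
    ((default_images.get? "economy").getD "")
  else
    ((default_images.get? "default").getD "")

-- ===== PORT B =====
def pvDefault : String :=
  "https://editorial.fxstreet.com/images/Markets/Currencies/Major/EURUSD-1_Large.jpg"

-- URL of category number r (0=forex, 1=stocks, 2=commodities, 3=crypto, 4=economy)
def pvCategoryUrls : List String :=
  ["https://editorial.fxstreet.com/images/Markets/Currencies/Major/EURUSD-1_Large.jpg",
   "https://editorial.fxstreet.com/images/Markets/Indices/Major/SP500_Large.jpg",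
   "https://editorial.fxstreet.com/images/Markets/Commodities/Energy/Oil_Large.jpg",
   "https://editorial.fxstreet.com/images/Markets/Cryptocurrencies/Bitcoin_Large.jpg",
   "https://editorial.fxstreet.com/images/Economic/economic-calendar_Large.jpg"]

-- the flat keyword -> rank dict of Source B, as its (key, value) items in insertion order
def pvKeywordRank : List (String × Int) :=
  [("forex", 0), ("eur", 0), ("usd", 0), ("gbp", 0), ("jpy", 0), ("currency", 0),
   ("stocks", 1), ("dow", 1), ("nasdaq", 1), ("s&p", 1), ("index", 1),
   ("gold", 2), ("oil", 2), ("commodity", 2), ("commodities", 2),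
   ("bitcoin", 3), ("crypto", 3), ("btc", 3), ("eth", 3),
   ("gdp", 4), ("economy", 4), ("inflation", 4), ("fed", 4), ("rate", 4)]

def get_default_image_alt (article_type : List (String × String)) : String :=
  let text := PySem.Str.lower ((PySem.Dict.mk article_type).getD "title" "" ++ " " ++ (PySem.Dict.mk article_type).getD "description" "")
  let ranks := pvKeywordRank.filterMap (fun p => if PySem.Str.isIn p.1 text then some p.2 else none)
  -- `if not ranks: return _DEFAULT; return _CATEGORY_URLS[min(ranks)]`:
  -- min? is none exactly when ranks = []; the index min(ranks) ∈ {0..4} is always in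
  -- range for the 5-element url list, so the `.getD ""` default is never supplied.
  match PySem.List.min? ranks (fun r => r) with
  | none => pvDefault
  | some m => (PySem.List.pyGet? pvCategoryUrls m).getD ""

-- ===== PRECONDITION & SPEC =====
def Spec_get_default_image (article_type : List (String × String)) (out : String) : Prop := out = get_default_image_alt article_type
instance (article_type : List (String × String)) (out : String) : Decidable (Spec_get_default_image article_type out) := by unfold Spec_get_default_image; infer_instance

-- ===== CLAIM (what is proved, stated in full; the proofs are below) =====
def Claim_equal_get_default_image : Prop := ∀ (article_type : List (String × String)), Dom_get_default_image article_type → Spec_get_default_image article_type (get_default_image article_type)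

-- ===== LEMMAS AND PROOFS =====

-- filterMap of the rank test over one keyword group (all ranks equal) is a replicate
theorem pv_fm_group (t : String) (kws : List String) (r : Int) :
    (kws.map (fun k => (k, r))).filterMap
        (fun p => if PySem.Str.isIn p.1 t then some p.2 else none)
      = List.replicate (kws.countP (fun k => PySem.Str.isIn k t)) r := by
  induction kws with
  | nil => rfl
  | cons k ks ih =>
      simp only [List.map_cons, List.filterMap_cons, List.countP_cons]
      by_cases h : PySem.Str.isIn k t = true
      · rw [if_pos h, if_pos h, ih]
        rfl
      · rw [if_neg h, if_neg h, ih, Nat.add_zero]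

theorem pv_foldl_min_replicate (a r : Int) (n : Nat) :
    (List.replicate n r).foldl min a = if n = 0 then a else min a r := by
  induction n generalizing a with
  | zero => rfl
  | succ m ih =>
      simp only [List.replicate_succ, List.foldl_cons, ih]
      rcases Nat.eq_zero_or_pos m with h | h
      · simp [h]
      · have : m ≠ 0 := by omega
        simp [this, min_assoc]

theorem pv_min?_replicate_append (n : Nat) (r : Int) (rest : List Int) :
    PySem.List.min? (List.replicate n r ++ rest) (fun x => x)
      = if n = 0 then PySem.List.min? rest (fun x => x)
        else some (rest.foldl min r) := by
  rcases Nat.eq_zero_or_pos n with h | h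
  · simp [h]
  · obtain ⟨m, rfl⟩ : ∃ m, n = m + 1 := ⟨n - 1, by omega⟩
    simp only [List.replicate_succ, List.cons_append, PySem.List.min?_id_cons,
      List.foldl_append, pv_foldl_min_replicate]
    rcases Nat.eq_zero_or_pos m with h' | h'
    · simp [h']
    · have : m ≠ 0 := by omega
      simp [this]

theorem pv_min?_replicate (n : Nat) (r : Int) :
    PySem.List.min? (List.replicate n r) (fun x => x)
      = if n = 0 then none else some r := by
  have h := pv_min?_replicate_append n r []
  simpa using h

-- ===== VERDICT (by name: the statement is the Claim_ definition above) =====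
theorem get_default_image_spec : Claim_equal_get_default_image := by
  intro article_type _
  unfold Spec_get_default_image get_default_image get_default_image_alt
  generalize PySem.Str.lower ((PySem.Dict.mk article_type).getD "title" "" ++ " " ++ (PySem.Dict.mk article_type).getD "description" "") = t
  have hsplit : pvKeywordRank =
      (["forex", "eur", "usd", "gbp", "jpy", "currency"].map (fun k => (k, (0:Int)))) ++
      (["stocks", "dow", "nasdaq", "s&p", "index"].map (fun k => (k, (1:Int)))) ++
      (["gold", "oil", "commodity", "commodities"].map (fun k => (k, (2:Int)))) ++
      (["bitcoin", "crypto", "btc", "eth"].map (fun k => (k, (3:Int)))) ++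
      (["gdp", "economy", "inflation", "fed", "rate"].map (fun k => (k, (4:Int)))) := rfl
  rw [hsplit]
  simp only [List.filterMap_append, pv_fm_group, List.append_assoc]
  have hc : ∀ (kws : List String),
      kws.any (fun w => PySem.Str.isIn w t) = true ↔
      kws.countP (fun k => PySem.Str.isIn k t) ≠ 0 := by
    intro kws
    rw [Ne, List.countP_eq_zero, List.any_eq_true]
    simp
  by_cases h0 : (["forex", "eur", "usd", "gbp", "jpy", "currency"] : List String).any (fun w => PySem.Str.isIn w t) = true
  case pos =>
    have n0 := (hc _).mp h0
    simp only [h0, if_true, reduceIte, pv_min?_replicate_append, pv_min?_replicate, List.foldl_append,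
      pv_foldl_min_replicate, n0, if_false, Bool.false_eq_true, eq_self_iff_true, if_true, reduceIte]
    split_ifs <;> rfl
  case neg =>
    have n0 : (["forex", "eur", "usd", "gbp", "jpy", "currency"] : List String).countP (fun k => PySem.Str.isIn k t) = 0 := by
      by_contra hne; exact h0 ((hc _).mpr hne)
    by_cases h1 : (["stocks", "dow", "nasdaq", "s&p", "index"] : List String).any (fun w => PySem.Str.isIn w t) = true
    case pos =>
      have n1 := (hc _).mp h1
      simp only [h0, if_false, reduceIte, h1, if_true, reduceIte, pv_min?_replicate_append, pv_min?_replicate, List.foldl_append,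
        pv_foldl_min_replicate, n0, n1, Bool.false_eq_true, eq_self_iff_true, if_true, if_false, reduceIte]
      split_ifs <;> rfl
    case neg =>
      have n1 : (["stocks", "dow", "nasdaq", "s&p", "index"] : List String).countP (fun k => PySem.Str.isIn k t) = 0 := by
        by_contra hne; exact h1 ((hc _).mpr hne)
      by_cases h2 : (["gold", "oil", "commodity", "commodities"] : List String).any (fun w => PySem.Str.isIn w t) = true
      case pos =>
        have n2 := (hc _).mp h2
        simp only [h0, h1, if_false, h2, if_true, reduceIte, pv_min?_replicate_append, pv_min?_replicate, List.foldl_append,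
          pv_foldl_min_replicate, n0, n1, n2, Bool.false_eq_true, eq_self_iff_true, if_true, if_false, reduceIte]
        split_ifs <;> rfl
      case neg =>
        have n2 : (["gold", "oil", "commodity", "commodities"] : List String).countP (fun k => PySem.Str.isIn k t) = 0 := by
          by_contra hne; exact h2 ((hc _).mpr hne)
        by_cases h3 : (["bitcoin", "crypto", "btc", "eth"] : List String).any (fun w => PySem.Str.isIn w t) = true
        case pos =>
          have n3 := (hc _).mp h3
          simp only [h0, h1, h2, if_false, h3, if_true, reduceIte, pv_min?_replicate_append, pv_min?_replicate, List.foldl_append,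
            pv_foldl_min_replicate, n0, n1, n2, n3, Bool.false_eq_true, eq_self_iff_true, if_true, if_false, reduceIte]
          split_ifs <;> rfl
        case neg =>
          have n3 : (["bitcoin", "crypto", "btc", "eth"] : List String).countP (fun k => PySem.Str.isIn k t) = 0 := by
            by_contra hne; exact h3 ((hc _).mpr hne)
          by_cases h4 : (["gdp", "economy", "inflation", "fed", "rate"] : List String).any (fun w => PySem.Str.isIn w t) = true
          case pos =>
            have n4 := (hc _).mp h4
            simp only [h0, h1, h2, h3, if_false, h4, if_true, reduceIte, pv_min?_replicate_append, pv_min?_replicate,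
              List.foldl_append, pv_foldl_min_replicate, n0, n1, n2, n3, n4, Bool.false_eq_true, eq_self_iff_true, if_true, if_false, reduceIte]
            rfl
          case neg =>
            have n4 : (["gdp", "economy", "inflation", "fed", "rate"] : List String).countP (fun k => PySem.Str.isIn k t) = 0 := by
              by_contra hne; exact h4 ((hc _).mpr hne)
            simp only [h0, h1, h2, h3, h4, if_false, pv_min?_replicate_append, pv_min?_replicate,
              n0, n1, n2, n3, n4, if_true, Bool.false_eq_true, eq_self_iff_true, if_false, reduceIte]
            rfl
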